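/- GENERATED by farm/mkstatement.py from design/units.tsv (unit `DGifGetLine.2`) and the assertions of Gif/Spec/Seg_DGifGetLine.lean — do not edit.
   THE STATEMENT of the proof unit `DGifGetLine.2`: segment 2 of `DGifGetLine` (15 instructions; entries 0x10a2c4;
   exits 0x10a2ea,0x10a28e; ranges 0x10a2c4-0x10a2ea,0x10a305-0x10a314)
   takes each of its entry assertions to one of its exit assertions (`Gif.Spec.DGifGetLine.Seg2`), given the contracts of its callees.
   What the names mean: ProgX/Base/Spec/Basic.lean (the shared hypotheses), Gif/Spec/Seg_DGifGetLine.lean (the assertions). The theorem to prove: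
   `theorem DGifGetLine_2_ok : Gif.Spec.DGifGetLine_2.Statement`. -/
import Gif.Code
import Gif.Dec.All
import Gif.Labels
import Gif.Spec.Lzw
import Gif.Spec.Seg_DGifGetLine
namespace Gif.Spec.DGifGetLine_2
open X86 X86.User Asan

/-- The statement of unit `DGifGetLine.2`. -/
def Statement : Prop :=
  ∀ (Lay : Layout) (_hLay : Lay.hi = 0x1000000) (μ : Microarch) (_hμ : UserX.MicroOK μ) (u₀ : State)
    (_hcode : HasCodeNat Lay u₀ Gif.L.DGifGetLine.entry Gif.Code.code_DGifGetLine.nat Gif.L.DGifGetLine.size)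
    (_h_DGifDecompressLine : ∀ (H : Heap) (rest : List Obj) (frames : List (Nat × FrameLayout)) (F : Forest) (R : Rd) (n : Nat), Calls Lay μ ProgX.Base.WayInv (ProgX.Base.conv u₀) Gif.L.DGifDecompressLine.entry (Gif.Spec.DGifDecompressLine.spec H rest frames F R n))
    (_h_asan_load8_noabort : Asan.SmallCheck Lay μ ProgX.Base.WayInv (ProgX.Base.CodeOK u₀) [.rax, .rcx, .rdx] 8 ProgX.Base.L.__asan_load8_noabort.entry),
    Gif.Spec.DGifGetLine.Seg2 Lay μ u₀

end Gif.Spec.DGifGetLine_2
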